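-- pv_equiv track=rewrite | github.com/rboulton/adventofcode | 2023/day3b.py | find_row_numbers
-- ===== SOURCE A (Python) =====
-- def find_row_numbers(row, pos):
--     result = []
--     out = ['.'] * len(row)
--     if row[pos].isdigit():
--         out[pos] = row[pos]
--     for x in range(pos - 1, -1, -1):
--         if not row[x].isdigit():
--             break
--         out[x] = row[x]
--     for x in range(pos + 1, len(row)):
--         if not row[x].isdigit():
--             break
--         out[x] = row[x]
--     return [int(x) for x in filter(lambda x: x != '', ''.join(out).split('.'))]
-- ===== SOURCE B (Python) =====
-- def find_row_numbers(row, pos):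
--     n = len(row)
--     if pos < 0 or pos >= n:
--         raise IndexError("string index out of range")
--     s = pos
--     while s > 0 and row[s - 1].isdigit():
--         s -= 1
--     e = pos + 1
--     while e < n and row[e].isdigit():
--         e += 1
--     if row[pos].isdigit():
--         return [int(row[s:e])]
--     result = []
--     if s < pos:
--         result.append(int(row[s:pos]))
--     if e > pos + 1:
--         result.append(int(row[pos + 1:e]))
--     return result
-- ===== Notes on version B (the rewrite author's own statement) =====
-- stated objective: faster
-- what changed: Instead of masking the whole row into a '.'-array and then join/split/parse it, B finds the run boundaries around pos directly (expand left, expand right) and parses at most two slices, doing work proportional to the touched runs rather than the row length.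
-- outside the precondition, e.g. on find_row_numbers('12', -1): A returns [12], B raises IndexError
import Mathlib
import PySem

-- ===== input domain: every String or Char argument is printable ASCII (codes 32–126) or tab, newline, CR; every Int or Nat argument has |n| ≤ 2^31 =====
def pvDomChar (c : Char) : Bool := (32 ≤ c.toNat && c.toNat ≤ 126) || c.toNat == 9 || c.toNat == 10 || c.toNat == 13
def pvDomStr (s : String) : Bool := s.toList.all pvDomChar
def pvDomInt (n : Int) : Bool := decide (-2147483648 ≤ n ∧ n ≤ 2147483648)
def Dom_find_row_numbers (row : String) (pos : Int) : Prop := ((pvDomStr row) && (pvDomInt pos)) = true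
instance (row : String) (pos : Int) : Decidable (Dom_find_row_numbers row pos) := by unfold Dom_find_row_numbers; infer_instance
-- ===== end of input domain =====

-- B replaces A's mask-the-whole-row + join/split/parse pipeline by direct expansion of the
-- digit runs adjacent to pos (work proportional to those runs, not the row length).


-- ===== PORT A =====
-- out[i] = c with Python's negative-index wrap (in-range whenever A reaches it inside Pre_)
def pvSetA (out : List Char) (i : Int) (c : Char) : List Char :=
  let j := if i < 0 then i + out.length else i
  out.set j.toNat c

-- the body shared by A's two for-loops: walk the index list, break on the first non-digit
def pvLoopA (row : List Char) : List Int → List Char → List Char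
  | [], out => out
  | x :: rest, out =>
    match PySem.List.pyGet? row x with
    | none => out            -- IndexError: unreachable inside Pre_
    | some c =>
      if PySem.Chars.isdigit c then pvLoopA row rest (pvSetA out x c) else out

def find_row_numbers (row : String) (pos : Int) : List Int :=
  let cs := row.toList
  let out0 := List.replicate cs.length '.'
  match PySem.List.pyGet? cs pos with
  | none => []               -- IndexError: outside Pre_
  | some c =>
    let out1 := if PySem.Chars.isdigit c then pvSetA out0 pos c else out0
    let out2 := pvLoopA cs (PySem.List.pyRange (pos - 1) (-1) (-1)) out1
    let out3 := pvLoopA cs (PySem.List.pyRange (pos + 1) cs.length 1) out2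
    (((PySem.Chars.splitOn (PySem.Chars.join [] (out3.map (fun ch => [ch]))) ['.']).filter
        (fun x => x ≠ [])).map (fun x => (PySem.Int.ofChars? x).getD 0))

-- ===== PORT B =====
-- while s > 0 and row[s-1].isdigit(): s -= 1
def pvLeftB (row : List Char) : Nat → Nat
  | 0 => 0
  | s + 1 => if PySem.Chars.isdigit (row.getD s ' ') then pvLeftB row s else s + 1

-- while e < n and row[e].isdigit(): e += 1
def pvRightB (row : List Char) (e : Nat) : Nat :=
  if h : e < row.length then
    if PySem.Chars.isdigit row[e] then pvRightB row (e + 1) else e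
  else e
termination_by row.length - e

def find_row_numbers_alt (row : String) (pos : Int) : List Int :=
  let cs := row.toList
  if pos < 0 ∨ (cs.length : Int) ≤ pos then []   -- raise IndexError: outside Pre_
  else
    let p := pos.toNat
    let s := pvLeftB cs p
    let e := pvRightB cs (p + 1)
    if PySem.Chars.isdigit (cs.getD p ' ') then
      [(PySem.Int.ofChars? ((cs.drop s).take (e - s))).getD 0]
    else
      (if s < p then [(PySem.Int.ofChars? ((cs.drop s).take (p - s))).getD 0] else []) ++
      (if p + 1 < e then [(PySem.Int.ofChars? ((cs.drop (p + 1)).take (e - (p + 1)))).getD 0] else [])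

-- ===== PRECONDITION & SPEC =====
-- Pre_ excludes pos ≥ len(row) and pos < -len(row), where A raises IndexError, and also
-- -len(row) ≤ pos < 0, where A returns a value only through Python's negative-index wraparound
-- (an accident of its implementation) and B, treating any pos outside [0, len(row)) as out of
-- range, raises IndexError.
def Pre_find_row_numbers (row : String) (pos : Int) : Prop :=
  0 ≤ pos ∧ pos < (row.toList.length : Int)
instance (row : String) (pos : Int) : Decidable (Pre_find_row_numbers row pos) := by
  unfold Pre_find_row_numbers; infer_instance

def pvWitness_find_row_numbers : String × Int := ("4.17", 2)

def Spec_find_row_numbers (row : String) (pos : Int) (out : List Int) : Prop :=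
  out = find_row_numbers_alt row pos
instance (row : String) (pos : Int) (out : List Int) : Decidable (Spec_find_row_numbers row pos out) := by
  unfold Spec_find_row_numbers; infer_instance

-- ===== CLAIM (what is proved, stated in full; the proofs are below) =====
def Claim_equal_find_row_numbers : Prop :=
  ∀ (row : String) (pos : Int), Dom_find_row_numbers row pos →
    Pre_find_row_numbers row pos →
    Spec_find_row_numbers row pos (find_row_numbers row pos)

-- ===== LEMMAS AND PROOFS =====

-- ---- splitting on '.' : PySem.Chars.splitOn with separator ['.'] is the structural dotSplit ----
def dotSplit : List Char → List (List Char)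
  | [] => [[]]
  | c :: rest =>
    if c = '.' then [] :: dotSplit rest
    else (c :: (dotSplit rest).headI) :: (dotSplit rest).tail

theorem dotSplit_ne_nil (l : List Char) : dotSplit l ≠ [] := by
  cases l with
  | nil => simp [dotSplit]
  | cons c r => simp only [dotSplit]; split <;> simp

theorem cons_headI_tail {l : List (List Char)} (h : l ≠ []) : l.headI :: l.tail = l := by
  cases l with
  | nil => exact absurd rfl h
  | cons a t => rfl

theorem splitOn_go_eq (fuel : Nat) :
    ∀ (l cur : List Char) (acc : List (List Char)), l.length < fuel →
      PySem.Chars.splitOn.go ['.'] fuel l cur acc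
        = acc.reverse ++ ((cur.reverse ++ (dotSplit l).headI) :: (dotSplit l).tail) := by
  induction fuel with
  | zero => intro l cur acc h; omega
  | succ fuel ih =>
    intro l cur acc h
    cases l with
    | nil => simp [PySem.Chars.splitOn.go, dotSplit]
    | cons c rest =>
      by_cases hc : c = '.'
      · subst hc
        have hpre : List.isPrefixOf ['.'] ('.' :: rest) = true := by
          simp [List.isPrefixOf]
        rw [PySem.Chars.splitOn.go]
        simp only [hpre, if_true, List.length_singleton, List.drop_succ_cons, List.drop_zero]
        rw [ih rest [] _ (by simpa using Nat.lt_of_succ_lt_succ h)]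
        simp only [dotSplit, if_true]
        simp [cons_headI_tail (dotSplit_ne_nil rest)]
      · have hpre : List.isPrefixOf ['.'] (c :: rest) = false := by
          simp [List.isPrefixOf]
          intro h'; exact hc h'.symm
        rw [PySem.Chars.splitOn.go]
        simp only [hpre, Bool.false_eq_true, if_false]
        rw [ih rest (c :: cur) acc (by simpa using Nat.lt_of_succ_lt_succ h)]
        simp [dotSplit, hc]

theorem splitOn_eq_dotSplit (l : List Char) :
    PySem.Chars.splitOn l ['.'] = dotSplit l := by
  rw [PySem.Chars.splitOn, splitOn_go_eq (l.length + 1) l [] [] (Nat.lt_succ_self _)]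
  simp [cons_headI_tail (dotSplit_ne_nil l)]

-- the nonempty pieces of a '.'-separated string
def pieces (l : List Char) : List (List Char) := (dotSplit l).filter (fun x => decide (x ≠ []))

theorem pieces_cons_dot (r : List Char) : pieces ('.' :: r) = pieces r := by
  simp [pieces, dotSplit]

theorem pieces_nil : pieces [] = [] := by simp [pieces, dotSplit]

theorem dotSplit_nondot_append (d r : List Char) (h : ∀ c ∈ d, c ≠ '.') :
    dotSplit (d ++ r) = (d ++ (dotSplit r).headI) :: (dotSplit r).tail := by
  induction d with
  | nil => simp [cons_headI_tail (dotSplit_ne_nil r)]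
  | cons c d ih =>
    have hc : c ≠ '.' := h c List.mem_cons_self
    have ih' := ih (fun x hx => h x (List.mem_cons_of_mem _ hx))
    simp only [List.cons_append, dotSplit, hc, if_false, ih']
    simp

theorem pieces_nondot_dot_append (d r : List Char) (h : ∀ c ∈ d, c ≠ '.') :
    pieces (d ++ '.' :: r) = (if d = [] then [] else [d]) ++ pieces r := by
  have hdot : dotSplit ('.' :: r) = [] :: dotSplit r := by simp [dotSplit]
  rw [pieces, dotSplit_nondot_append d _ h, hdot]
  simp only [List.headI_cons, List.tail_cons, List.append_nil, List.filter_cons]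
  by_cases hd : d = []
  · simp [hd, pieces]
  · simp [hd, pieces]

theorem pieces_replicate_append (m : Nat) (r : List Char) :
    pieces (List.replicate m '.' ++ r) = pieces r := by
  induction m with
  | zero => simp
  | succ m ih => rw [List.replicate_succ, List.cons_append, pieces_cons_dot, ih]

theorem pieces_nondot_dots (d : List Char) (m : Nat) (h : ∀ c ∈ d, c ≠ '.') :
    pieces (d ++ List.replicate m '.') = if d = [] then [] else [d] := by
  cases m with
  | zero =>
    have hds : dotSplit d = [d] := by
      have := dotSplit_nondot_append d [] h
      simpa [dotSplit] using this
    simp only [List.replicate_zero, List.append_nil, pieces, hds, List.filter_cons,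
      List.filter_nil]
    by_cases hd : d = [] <;> simp [hd]
  | succ m =>
    have hrep : pieces (List.replicate m '.') = [] := by
      simpa [pieces_nil] using pieces_replicate_append m []
    rw [List.replicate_succ, pieces_nondot_dot_append d _ h, hrep]
    simp

-- ---- facts about B's boundary scans ----
theorem pvLeftB_le (cs : List Char) : ∀ p, pvLeftB cs p ≤ p := by
  intro p
  induction p with
  | zero => simp [pvLeftB]
  | succ p ih =>
    simp only [pvLeftB]
    split
    · omega
    · omega

theorem pvLeftB_succ_pos (cs : List Char) (p : Nat)
    (hd : PySem.Chars.isdigit (cs.getD p ' ') = true) :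
    pvLeftB cs (p + 1) = pvLeftB cs p := by
  simp only [pvLeftB, hd, if_true]

theorem pvLeftB_succ_neg (cs : List Char) (p : Nat)
    (hd : ¬ PySem.Chars.isdigit (cs.getD p ' ') = true) :
    pvLeftB cs (p + 1) = p + 1 := by
  simp only [pvLeftB, if_neg hd]

theorem pvLeftB_digit (cs : List Char) :
    ∀ p x, pvLeftB cs p ≤ x → x < p → PySem.Chars.isdigit (cs.getD x ' ') = true := by
  intro p
  induction p with
  | zero => intro x _ hx; omega
  | succ p ih =>
    intro x h1 h2
    by_cases hd : PySem.Chars.isdigit (cs.getD p ' ') = true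
    · rcases Nat.lt_or_ge x p with hx | hx
      · exact ih x (by rwa [pvLeftB_succ_pos cs p hd] at h1) hx
      · have : x = p := by omega
        subst this; exact hd
    · have := pvLeftB_succ_neg cs p hd
      omega

theorem pvRightB_lb (cs : List Char) (i : Nat) : i ≤ pvRightB cs i := by
  fun_induction pvRightB with
  | case1 e h hd ih => omega
  | case2 e h hd => omega
  | case3 e h => omega

theorem pvRightB_ub (cs : List Char) (i : Nat) (h : i ≤ cs.length) : pvRightB cs i ≤ cs.length := by
  fun_induction pvRightB with
  | case1 e h hd ih => exact ih (by omega)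
  | case2 e h hd => omega
  | case3 e h => omega

theorem pvRightB_digit (cs : List Char) (i : Nat) :
    ∀ x, i ≤ x → x < pvRightB cs i → PySem.Chars.isdigit (cs.getD x ' ') = true := by
  fun_induction pvRightB with
  | case1 e h hd ih =>
    intro x h1 h2
    rcases Nat.lt_or_ge x (e + 1) with hx | hx
    · have : x = e := by omega
      subst this
      rwa [List.getD_eq_getElem cs ' ' h]
    · exact ih x hx h2
  | case2 e h hd => intro x h1 h2; omega
  | case3 e h => intro x h1 h2; omega

-- elements of a segment slice satisfy a pointwise property
theorem all_seg {P : Char → Prop} (cs : List Char) (s p : Nat) (_hp : p ≤ cs.length)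
    (h : ∀ x, s ≤ x → x < p → P (cs.getD x ' ')) :
    ∀ c ∈ (cs.drop s).take (p - s), P c := by
  intro c hc
  rw [List.mem_iff_getElem] at hc
  obtain ⟨j, hj, rfl⟩ := hc
  have hj1 : j < p - s := by
    have := hj; simp [List.length_take, List.length_drop] at this; omega
  have hj2 : s + j < cs.length := by
    have := hj; simp [List.length_take, List.length_drop] at this; omega
  have hget : (List.take (p - s) (List.drop s cs))[j] = cs[s + j] := by
    rw [List.getElem_take, List.getElem_drop]
  rw [hget, ← List.getD_eq_getElem cs ' ' hj2]
  exact h (s + j) (by omega) (by omega)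

theorem pvSetA_natCast (out : List Char) (k : Nat) (c : Char) :
    pvSetA out (k : Int) c = out.set k c := by
  simp only [pvSetA]
  split
  · exact absurd (by assumption) (by omega)
  · simp

-- ---- characterization of A's two masking loops ----
theorem loopLeft_eq (cs : List Char) :
    ∀ (p : Nat), p ≤ cs.length → ∀ out : List Char, out.length = cs.length →
      pvLoopA cs (PySem.List.pyRange ((p : Int) - 1) (-1) (-1)) out
        = out.take (pvLeftB cs p) ++ (cs.drop (pvLeftB cs p)).take (p - pvLeftB cs p)
            ++ out.drop p := by
  intro p
  induction p with
  | zero =>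
    intro _ out _
    rw [show ((0 : Nat) : Int) - 1 = -1 by ring, PySem.List.pyRange_neg_one_eq_nil (by omega)]
    simp [pvLoopA, pvLeftB]
  | succ p ih =>
    intro hp out hout
    have hplt : p < cs.length := by omega
    rw [show ((p + 1 : Nat) : Int) - 1 = (p : Int) by push_cast; ring,
        PySem.List.pyRange_neg_one_cons (by omega)]
    simp only [pvLoopA, PySem.List.pyGet?_natCast, List.getElem?_eq_getElem hplt]
    by_cases hd : PySem.Chars.isdigit cs[p] = true
    · have hgd : PySem.Chars.isdigit (cs.getD p ' ') = true := by
        rwa [List.getD_eq_getElem cs ' ' hplt]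
      have hLeq : pvLeftB cs (p + 1) = pvLeftB cs p := pvLeftB_succ_pos cs p hgd
      have hset : pvSetA out (p : Int) cs[p] = out.set p cs[p] := by
        simp only [pvSetA]
        split
        · omega
        · simp
      simp only [hd, if_true, hset]
      rw [ih hplt.le (out.set p cs[p]) (by simp [hout])]
      set s := pvLeftB cs p with hs
      have hsle : s ≤ p := pvLeftB_le cs p
      have h1 : (out.set p cs[p]).take s = out.take s := by
        rw [List.take_set, List.set_eq_of_length_le]
        simp [List.length_take]; omega
      have h2 : (out.set p cs[p]).drop p = cs[p] :: out.drop (p + 1) := by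
        rw [List.drop_set, if_neg (Nat.lt_irrefl p), Nat.sub_self,
            List.drop_eq_getElem_cons (show p < out.length by omega)]
        rfl
      have h3 : (cs.drop s).take (p + 1 - s) = (cs.drop s).take (p - s) ++ [cs[p]] := by
        rw [show p + 1 - s = (p - s) + 1 by omega, List.take_add_one]
        congr 1
        rw [List.getElem?_drop, show s + (p - s) = p by omega,
            List.getElem?_eq_getElem hplt]
        rfl
      rw [h1, h2, hLeq, h3]
      simp
    · have hgd : ¬ PySem.Chars.isdigit (cs.getD p ' ') = true := by
        rwa [List.getD_eq_getElem cs ' ' hplt]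
      have hLeq : pvLeftB cs (p + 1) = p + 1 := pvLeftB_succ_neg cs p hgd
      simp only [hd, if_false, hLeq, Bool.false_eq_true]
      rw [Nat.sub_self]
      simp [List.take_append_drop]

theorem loopRight_eq (cs : List Char) :
    ∀ (f i : Nat), cs.length - i ≤ f → i ≤ cs.length → ∀ out : List Char,
      out.length = cs.length →
      pvLoopA cs (PySem.List.pyRange (i : Int) (cs.length : Int) 1) out
        = out.take i ++ (cs.drop i).take (pvRightB cs i - i) ++ out.drop (pvRightB cs i) := by
  intro f
  induction f with
  | zero =>
    intro i hf hi out hout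
    have hieq : i = cs.length := by omega
    subst hieq
    rw [PySem.List.pyRange_one_eq_nil (by omega), pvRightB]
    simp [pvLoopA, List.take_append_drop]
  | succ f ih =>
    intro i hf hi out hout
    by_cases hilt : i < cs.length
    · rw [PySem.List.pyRange_one_cons (by exact_mod_cast hilt),
          show (i : Int) + 1 = ((i + 1 : Nat) : Int) by push_cast; ring]
      simp only [pvLoopA, PySem.List.pyGet?_natCast, List.getElem?_eq_getElem hilt]
      rw [pvRightB]
      simp only [hilt, dif_pos]
      by_cases hd : PySem.Chars.isdigit cs[i] = true
      · have hset : pvSetA out (i : Int) cs[i] = out.set i cs[i] := by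
          simp only [pvSetA]
          split
          · exact absurd (by assumption) (by omega)
          · simp
        simp only [hd, if_true, hset]
        rw [ih (i + 1) (by omega) (by omega) (out.set i cs[i]) (by simp [hout])]
        set E := pvRightB cs (i + 1) with hE
        have hElb : i + 1 ≤ E := pvRightB_lb cs (i + 1)
        have h1 : (out.set i cs[i]).take (i + 1) = out.take i ++ [cs[i]] := by
          rw [List.take_set, List.take_add_one,
              List.getElem?_eq_getElem (show i < out.length by omega), List.set_append]
          simp [List.length_take, Nat.min_eq_left (show i ≤ out.length by omega)]
        have h2 : (cs.drop i).take (E - i) = cs[i] :: (cs.drop (i + 1)).take (E - (i + 1)) := by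
          rw [List.drop_eq_getElem_cons hilt, show E - i = (E - (i + 1)) + 1 by omega]
          rfl
        have h3 : (out.set i cs[i]).drop E = out.drop E := by
          rw [List.drop_set]
          simp [show i < E by omega]
        rw [h1, h2, h3]
        simp [List.append_assoc]
      · simp only [hd, if_false, Bool.false_eq_true, Nat.sub_self]
        simp [List.take_append_drop]
    · have hieq : i = cs.length := by omega
      subst hieq
      rw [PySem.List.pyRange_one_eq_nil (by omega), pvRightB]
      simp [pvLoopA, List.take_append_drop]

-- digits are not dots
theorem isdigit_ne_dot {c : Char} (h : PySem.Chars.isdigit c = true) : c ≠ '.' := by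
  intro hc; subst hc; simp [PySem.Chars.isdigit] at h

theorem pieces_eq (X : List Char) :
    (PySem.Chars.splitOn X ['.']).filter (fun x => decide (x ≠ [])) = pieces X := by
  rw [splitOn_eq_dotSplit]; rfl

-- ===== VERDICT (by name: the statement is the Claim_ definition above) =====
theorem find_row_numbers_spec : Claim_equal_find_row_numbers := by
  intro row pos _hdom hpre
  unfold Spec_find_row_numbers
  obtain ⟨h0, hlt⟩ := hpre
  obtain ⟨p, rfl⟩ : ∃ p : Nat, pos = (p : Int) := ⟨pos.toNat, (Int.toNat_of_nonneg h0).symm⟩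
  have hp : p < row.toList.length := by exact_mod_cast hlt
  set cs := row.toList with hcs
  set s := pvLeftB cs p with hs
  set e := pvRightB cs (p + 1) with he
  have hsle : s ≤ p := pvLeftB_le cs p
  have hep : p + 1 ≤ e := pvRightB_lb cs (p + 1)
  have hen : e ≤ cs.length := pvRightB_ub cs (p + 1) (by omega)
  have hget : cs.getD p ' ' = cs[p] := List.getD_eq_getElem cs ' ' hp
  have hA1 : PySem.List.pyGet? cs (p : Int) = some cs[p] := by
    rw [PySem.List.pyGet?_natCast, List.getElem?_eq_getElem hp]
  have hBguard : ¬ ((p : Int) < 0 ∨ (cs.length : Int) ≤ (p : Int)) := by omega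
  have hdigL : ∀ c ∈ (cs.drop s).take (p - s), PySem.Chars.isdigit c = true :=
    all_seg cs s p hp.le (fun x h1 h2 => pvLeftB_digit cs p x h1 h2)
  have hdigR : ∀ c ∈ (cs.drop (p + 1)).take (e - (p + 1)), PySem.Chars.isdigit c = true :=
    all_seg cs (p + 1) e hen (fun x h1 h2 => pvRightB_digit cs (p + 1) x h1 h2)
  have hndL : ∀ c ∈ (cs.drop s).take (p - s), c ≠ '.' :=
    fun c hc => isdigit_ne_dot (hdigL c hc)
  have hndR : ∀ c ∈ (cs.drop (p + 1)).take (e - (p + 1)), c ≠ '.' :=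
    fun c hc => isdigit_ne_dot (hdigR c hc)
  have hsegLlen : ((cs.drop s).take (p - s)).length = p - s := by
    simp [List.length_take, List.length_drop]; omega
  have hsegL_nil : ((cs.drop s).take (p - s) = []) ↔ ¬ s < p := by
    rw [← List.length_eq_zero_iff, hsegLlen]; omega
  have hsegRlen : ((cs.drop (p + 1)).take (e - (p + 1))).length = e - (p + 1) := by
    simp [List.length_take, List.length_drop]; omega
  have hsegR_nil : ((cs.drop (p + 1)).take (e - (p + 1)) = []) ↔ ¬ p + 1 < e := by
    rw [← List.length_eq_zero_iff, hsegRlen]; omega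
  -- reduce B
  rw [find_row_numbers_alt]
  simp only [← hcs, hBguard, if_false, Int.toNat_natCast, hget, ← hs, ← he]
  -- reduce A up to the two loops
  rw [find_row_numbers]
  simp only [← hcs, hA1]
  by_cases hd : PySem.Chars.isdigit cs[p] = true
  · -- pos sits on a digit: one number, the whole run
    simp only [hd, if_true, pvSetA_natCast]
    rw [loopLeft_eq cs p hp.le _ (by simp)]
    rw [show ((p : Int) + 1) = ((p + 1 : Nat) : Int) by omega]
    rw [loopRight_eq cs cs.length (p + 1) (by omega) (by omega) _
        (by simp [List.length_take, List.length_drop]; omega)]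
    simp only [← hs, ← he]
    have e1 : ((List.replicate cs.length '.').set p cs[p]).take s = List.replicate s '.' := by
      rw [List.take_set, List.set_eq_of_length_le (by simp; omega), List.take_replicate]
      congr 1; omega
    have e2 : ((List.replicate cs.length '.').set p cs[p]).drop p
        = cs[p] :: List.replicate (cs.length - (p + 1)) '.' := by
      rw [List.drop_set, if_neg (Nat.lt_irrefl p), Nat.sub_self,
          List.drop_eq_getElem_cons (show p < (List.replicate cs.length '.').length by simpa),
          List.set_cons_zero, List.drop_replicate]
    rw [e1, e2]
    -- take (p+1) and drop e of the masked row
    have etake : (List.replicate s '.' ++ (cs.drop s).take (p - s)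
          ++ cs[p] :: List.replicate (cs.length - (p + 1)) '.').take (p + 1)
        = List.replicate s '.' ++ (cs.drop s).take (p - s) ++ [cs[p]] := by
      rw [List.take_append, List.take_append, List.take_replicate, List.take_take]
      simp only [List.length_append, List.length_replicate, hsegLlen]
      rw [show min (p + 1) s = s by omega, show min (p + 1 - s) (p - s) = p - s by omega,
          show p + 1 - (s + (p - s)) = 1 by omega]
      simp
    have hdropX : (List.replicate s '.' ++ (cs.drop s).take (p - s)
          ++ cs[p] :: List.replicate (cs.length - (p + 1)) '.').drop e
        = List.replicate (cs.length - e) '.' := by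
      rw [List.drop_append, List.drop_append, List.drop_replicate]
      simp only [List.length_append, List.length_replicate, hsegLlen]
      rw [show s - e = 0 by omega,
          show e - (s + (p - s)) = (e - (p + 1)) + 1 by omega,
          List.drop_succ_cons, List.drop_replicate,
          List.drop_eq_nil_of_le (le_of_eq_of_le hsegLlen (by omega)),
          show cs.length - (p + 1) - (e - (p + 1)) = cs.length - e by omega]
      simp
    rw [etake, hdropX, PySem.Chars.join_nil_singletons, pieces_eq]
    rw [show List.replicate s '.' ++ (cs.drop s).take (p - s) ++ [cs[p]]
          ++ (cs.drop (p + 1)).take (e - (p + 1)) ++ List.replicate (cs.length - e) '.'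
        = List.replicate s '.' ++ (((cs.drop s).take (p - s)
            ++ cs[p] :: (cs.drop (p + 1)).take (e - (p + 1)))
          ++ List.replicate (cs.length - e) '.') by simp]
    rw [pieces_replicate_append,
        pieces_nondot_dots _ _ (by
          intro c hc
          rcases List.mem_append.mp hc with hc1 | hc2
          · exact hndL c hc1
          · rcases List.mem_cons.mp hc2 with rfl | hc3
            · exact isdigit_ne_dot hd
            · exact hndR c hc3)]
    rw [if_neg (by simp)]
    -- the one number is the whole run around pos
    have hseg : (cs.drop s).take (e - s)
        = (cs.drop s).take (p - s) ++ cs[p] :: (cs.drop (p + 1)).take (e - (p + 1)) := by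
      rw [show e - s = (p - s) + ((e - (p + 1)) + 1) by omega, List.take_add,
          List.drop_drop, show s + (p - s) = p by omega, List.drop_eq_getElem_cons hp,
          List.take_succ_cons]
    simp only [hseg, List.map_cons, List.map_nil]
  · -- pos is not on a digit: at most two numbers, the left and right runs
    simp only [hd, Bool.false_eq_true, if_false]
    rw [loopLeft_eq cs p hp.le _ (by simp)]
    rw [show ((p : Int) + 1) = ((p + 1 : Nat) : Int) by omega]
    rw [loopRight_eq cs cs.length (p + 1) (by omega) (by omega) _
        (by simp [List.length_take, List.length_drop]; omega)]
    simp only [← hs, ← he]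
    have e1 : (List.replicate cs.length '.').take s = List.replicate s '.' := by
      rw [List.take_replicate]; congr 1; omega
    have e2 : (List.replicate cs.length '.').drop p = List.replicate (cs.length - p) '.' :=
      List.drop_replicate
    rw [e1, e2]
    have etake : (List.replicate s '.' ++ (cs.drop s).take (p - s)
          ++ List.replicate (cs.length - p) '.').take (p + 1)
        = List.replicate s '.' ++ (cs.drop s).take (p - s) ++ ['.'] := by
      rw [List.take_append, List.take_append, List.take_replicate, List.take_take,
          List.take_replicate]
      simp only [List.length_append, List.length_replicate, hsegLlen]
      rw [show min (p + 1) s = s by omega, show min (p + 1 - s) (p - s) = p - s by omega,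
          show min (p + 1 - (s + (p - s))) (cs.length - p) = 1 by omega]
      rfl
    have hdropX : (List.replicate s '.' ++ (cs.drop s).take (p - s)
          ++ List.replicate (cs.length - p) '.').drop e
        = List.replicate (cs.length - e) '.' := by
      rw [List.drop_append, List.drop_append, List.drop_replicate, List.drop_replicate]
      simp only [List.length_append, List.length_replicate, hsegLlen]
      rw [show s - e = 0 by omega,
          List.drop_eq_nil_of_le (le_of_eq_of_le hsegLlen (by omega)),
          show cs.length - p - (e - (s + (p - s))) = cs.length - e by omega]
      simp
    rw [etake, hdropX, PySem.Chars.join_nil_singletons, pieces_eq]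
    rw [show List.replicate s '.' ++ (cs.drop s).take (p - s) ++ ['.']
          ++ (cs.drop (p + 1)).take (e - (p + 1)) ++ List.replicate (cs.length - e) '.'
        = List.replicate s '.' ++ ((cs.drop s).take (p - s)
            ++ '.' :: ((cs.drop (p + 1)).take (e - (p + 1))
              ++ List.replicate (cs.length - e) '.')) by simp]
    rw [pieces_replicate_append, pieces_nondot_dot_append _ _ hndL,
        pieces_nondot_dots _ _ hndR, List.map_append]
    by_cases hsp : s < p <;> by_cases hpe : p + 1 < e <;>
      simp [hsegL_nil, hsegR_nil, hsp, hpe]
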